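-- pv_equiv track=rewrite | github.com/Maahi10001/DSA-KMIT | Day-35/Day-35-p1.py | getword
-- ===== SOURCE A (Python) =====
-- def getword(s,l):
--     res=list(l)
--     for i in range(len(s)-2,-1,-1): # getting the prefix sum by traversing from last
--         res[i]+=res[i+1]
--     temp=[]
--     for  i in range(len(s)):
--         restr=(ord(s[i])-ord('a')+res[i]%26)%26  #%26 if the sum exceeds 26
--         temp.append(chr(ord('a')+restr))
--     return ''.join(temp)
-- ===== SOURCE B (Python) =====
-- def getword(s, l):
--     acc = 0
--     out = []
--     for i in range(len(s) - 1, -1, -1):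
--         acc += l[i]
--         out.append(chr(ord('a') + (ord(s[i]) - ord('a') + acc % 26) % 26))
--     return ''.join(reversed(out))
-- ===== Notes on version B (the rewrite author's own statement) =====
-- stated objective: simpler
-- what changed: Replaces the suffix-sum array (copy of l mutated in place, then a second indexing pass) by a single backward walk keeping one running accumulator and building the characters directly, reversing once at the end.
import Mathlib
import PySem

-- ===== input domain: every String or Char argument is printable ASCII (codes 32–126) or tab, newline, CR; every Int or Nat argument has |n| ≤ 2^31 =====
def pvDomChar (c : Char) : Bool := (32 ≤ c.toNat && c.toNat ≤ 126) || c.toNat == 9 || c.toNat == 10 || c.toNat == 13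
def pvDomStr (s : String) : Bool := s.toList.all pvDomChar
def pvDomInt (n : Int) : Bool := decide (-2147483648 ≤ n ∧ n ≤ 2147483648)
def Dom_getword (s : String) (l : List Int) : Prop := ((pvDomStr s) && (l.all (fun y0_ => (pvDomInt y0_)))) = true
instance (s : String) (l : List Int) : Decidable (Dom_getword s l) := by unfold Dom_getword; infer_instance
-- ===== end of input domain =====

-- B replaces A's mutated suffix-sum array and second indexing pass by one backward walk
-- with a running accumulator (objective: simpler, one pass).

-- ===== PORT A =====
-- first loop: for i in range(len(s)-2,-1,-1): res[i] += res[i+1]; fuel f processes index f-1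
def getwordSuffLoop (r : List Int) : Nat → List Int
  | 0 => r
  | i + 1 => getwordSuffLoop (r.set i (r.getD i 0 + r.getD (i + 1) 0)) i

-- second loop: for i in range(len(s)): temp.append(chr(ord('a')+(ord(s[i])-ord('a')+res[i]%26)%26))
def getwordTempLoop (cs : List Char) (res : List Int) : List Char → Nat → Nat → List Char
  | temp, _, 0 => temp
  | temp, i, k + 1 =>
    getwordTempLoop cs res
      (temp ++ [Char.ofNat (97 +
        (PySem.Int.mod (((cs.getD i ' ').toNat : Int) - 97 + PySem.Int.mod (res.getD i 0) 26) 26).toNat)])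
      (i + 1) k

def getword (s : String) (l : List Int) : String :=
  let cs := s.toList
  let n := cs.length
  let res := getwordSuffLoop l (n - 1)
  String.mk (getwordTempLoop cs res [] 0 n)

-- ===== PORT B =====
-- one backward pass: acc += l[i]; out.append(shifted char); finally reversed(out) joined
def getwordAltLoop (cs : List Char) (l : List Int) : Int → List Char → Nat → List Char
  | _, out, 0 => out
  | acc, out, i + 1 =>
    let acc' := acc + l.getD i 0
    getwordAltLoop cs l acc'
      (out ++ [Char.ofNat (97 +
        (PySem.Int.mod (((cs.getD i ' ').toNat : Int) - 97 + PySem.Int.mod acc' 26) 26).toNat)]) i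

def getword_alt (s : String) (l : List Int) : String :=
  let cs := s.toList
  String.mk ((getwordAltLoop cs l 0 [] cs.length).reverse)

-- ===== PRECONDITION & SPEC =====
-- Pre_ excludes exactly the inputs where Python A raises IndexError: len(s) > len(l)
-- (B raises there too); A is total otherwise.
def Pre_getword (s : String) (l : List Int) : Prop := s.toList.length ≤ l.length
instance (s : String) (l : List Int) : Decidable (Pre_getword s l) := by unfold Pre_getword; infer_instance
def pvWitness_getword : String × List Int := ("abc", [1, 2, 3])
def Spec_getword (s : String) (l : List Int) (out : String) : Prop := out = getword_alt s l
instance (s : String) (l : List Int) (out : String) : Decidable (Spec_getword s l out) := by unfold Spec_getword; infer_instance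

-- ===== CLAIM (what is proved, stated in full; the proofs are below) =====
def Claim_equal_getword : Prop := ∀ (s : String) (l : List Int), Dom_getword s l → Pre_getword s l → Spec_getword s l (getword s l)

-- ===== LEMMAS AND PROOFS =====

-- suffix sum of l over [i, n)
def pvSuff (l : List Int) (n i : Nat) : Int :=
  if _h : i < n then l.getD i 0 + pvSuff l n (i + 1) else 0
termination_by n - i

-- the shifted character at index j with shift m
def pvCh (cs : List Char) (j : Nat) (m : Int) : Char :=
  Char.ofNat (97 + (PySem.Int.mod (((cs.getD j ' ').toNat : Int) - 97 + PySem.Int.mod m 26) 26).toNat)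

lemma pvSuff_of_lt (l : List Int) (n i : Nat) (h : i < n) :
    pvSuff l n i = l.getD i 0 + pvSuff l n (i + 1) := by
  rw [pvSuff]; simp [h]

lemma pvSuff_of_ge (l : List Int) (n i : Nat) (h : n ≤ i) : pvSuff l n i = 0 := by
  rw [pvSuff]; simp [Nat.not_lt.mpr h]

lemma getwordSuffLoop_getD (l : List Int) (n : Nat) (hn : n ≤ l.length) :
    ∀ (f : Nat) (r : List Int), f ≤ n - 1 → r.length = l.length →
      (∀ j, j < f → r.getD j 0 = l.getD j 0) →
      (∀ j, f ≤ j → j < n → r.getD j 0 = pvSuff l n j) →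
      ∀ j, j < n → (getwordSuffLoop r f).getD j 0 = pvSuff l n j := by
  intro f
  induction f with
  | zero =>
    intro r _ _ _ hhi j hj
    exact hhi j (Nat.zero_le j) hj
  | succ i ih =>
    intro r hf hlen hlo hhi j hj
    have hin : i + 1 < n := by omega
    have hIlen : i < r.length := by omega
    have hval : r.getD i 0 + r.getD (i + 1) 0 = pvSuff l n i := by
      rw [hlo i (Nat.lt_succ_self i), hhi (i + 1) (Nat.le_refl _) hin,
        pvSuff_of_lt l n i (by omega)]
    show (getwordSuffLoop (r.set i (r.getD i 0 + r.getD (i + 1) 0)) i).getD j 0 = _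
    refine ih (r.set i _) (by omega) (by simp [hlen]) ?_ ?_ j hj
    · intro k hk
      have hne : i ≠ k := by omega
      simp only [List.getD, List.getElem?_set_ne hne]
      exact hlo k (by omega)
    · intro k hk hkn
      by_cases hki : k = i
      · subst hki
        simp only [List.getD, List.getElem?_set_self hIlen, Option.getD_some]
        exact hval
      · have hne : i ≠ k := fun h => hki h.symm
        simp only [List.getD, List.getElem?_set_ne hne]
        exact hhi k (by omega) hkn

lemma getwordTempLoop_eq (cs : List Char) (res : List Int) :
    ∀ (k i : Nat) (temp : List Char),
      getwordTempLoop cs res temp i k =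
        temp ++ (List.range' i k).map (fun j => pvCh cs j (res.getD j 0)) := by
  intro k
  induction k with
  | zero => intro i temp; simp [getwordTempLoop]
  | succ m ih =>
    intro i temp
    rw [getwordTempLoop, ih (i + 1), List.range'_succ]
    simp [pvCh]

lemma getwordAltLoop_eq (cs : List Char) (l : List Int) (n : Nat) :
    ∀ (f : Nat) (acc : Int) (out : List Char), f ≤ n → acc = pvSuff l n f →
      getwordAltLoop cs l acc out f =
        out ++ (List.range f).reverse.map (fun j => pvCh cs j (pvSuff l n j)) := by
  intro f
  induction f with
  | zero => intro acc out _ _; simp [getwordAltLoop]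
  | succ i ih =>
    intro acc out hf hacc
    have hacc' : acc + l.getD i 0 = pvSuff l n i := by
      rw [hacc, pvSuff_of_lt l n i (by omega)]; ring
    rw [getwordAltLoop]
    show getwordAltLoop cs l (acc + l.getD i 0) _ i = _
    rw [hacc', ih _ _ (by omega) rfl, List.range_succ]
    simp [pvCh]

-- ===== VERDICT (by name: the statement is the Claim_ definition above) =====
theorem getword_spec : Claim_equal_getword := by
  intro s l _hdom hpre
  show String.mk (getwordTempLoop s.toList (getwordSuffLoop l (s.toList.length - 1)) [] 0 s.toList.length)
      = String.mk ((getwordAltLoop s.toList l 0 [] s.toList.length).reverse)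
  have hnl : s.toList.length ≤ l.length := hpre
  have hres : ∀ j, j < s.toList.length →
      (getwordSuffLoop l (s.toList.length - 1)).getD j 0 = pvSuff l s.toList.length j := by
    refine getwordSuffLoop_getD l s.toList.length hnl (s.toList.length - 1) l (Nat.le_refl _)
      rfl (fun j _ => rfl) ?_
    intro j hj hjn
    have hj' : j = s.toList.length - 1 := by omega
    subst hj'
    rw [pvSuff_of_lt l s.toList.length _ (by omega), pvSuff_of_ge l s.toList.length _ (by omega)]
    ring
  rw [getwordTempLoop_eq, getwordAltLoop_eq s.toList l s.toList.length s.toList.length 0 []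
    (Nat.le_refl _) (by rw [pvSuff_of_ge l s.toList.length _ (Nat.le_refl _)])]
  simp only [List.nil_append, List.map_reverse, List.reverse_reverse]
  congr 1
  rw [← List.range_eq_range']
  exact List.map_congr_left (fun j hj => by rw [hres j (List.mem_range.mp hj)])
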